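-- pv_equiv track=rewrite | github.com/Starwort/advent-of-code-2019 | day4.py | has_matching
-- ===== SOURCE A (Python) =====
-- def has_matching(i: str):
--     last_char = ""
--     run = 0
--     for j in i:
--         if j != last_char:
--             if run == 1:
--                 return True
--             last_char = j
--             run = 0
--         else:
--             run += 1
--     if run == 1:
--         return True
--     return False
-- ===== SOURCE B (Python) =====
-- def has_matching(i: str):
--     # Stateless positional test: a run of exactly two equal characters starts at
--     # index k iff i[k] == i[k+1] and the neighbours just outside differ (or are absent).
--     n = len(i)
--     return any(
--         i[k] == i[k + 1]
--         and (k == 0 or i[k - 1] != i[k])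
--         and (k + 2 == n or i[k + 2] != i[k])
--         for k in range(n - 1)
--     )
-- ===== Notes on version B (the rewrite author's own statement) =====
-- stated objective: alternative
-- what changed: Replaced A's last_char/run-counter state machine with a stateless existential test over positions: some index k has i[k]==i[k+1] with differing (or absent) characters immediately before and after, i.e. a run of exactly two starts at k; no run counting or loop state at all.
import Mathlib
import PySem

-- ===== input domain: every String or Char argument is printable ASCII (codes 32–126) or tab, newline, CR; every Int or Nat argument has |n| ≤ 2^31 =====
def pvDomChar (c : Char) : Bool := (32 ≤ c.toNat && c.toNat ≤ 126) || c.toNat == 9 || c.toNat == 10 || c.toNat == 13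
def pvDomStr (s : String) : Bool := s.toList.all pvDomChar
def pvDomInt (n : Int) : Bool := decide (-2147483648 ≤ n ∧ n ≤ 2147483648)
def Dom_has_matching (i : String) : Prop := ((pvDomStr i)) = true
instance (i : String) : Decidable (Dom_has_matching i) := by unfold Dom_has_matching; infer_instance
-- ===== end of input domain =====

-- B replaces A's last_char/run-counter state machine by a stateless existential test
-- over positions (a run of exactly two starts at k iff i[k]==i[k+1] with differing or
-- absent outside neighbours); alternative decomposition, same cost.

-- ===== PORT A =====
-- A's loop: state (last_char, run), early return True when a run with counter 1 ends; final check after the loop.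
def hasMatchingGoA : List Char → Option Char → Nat → Bool
  | [], _, run => run == 1
  | j :: rest, last, run =>
    if some j ≠ last then
      (if run == 1 then true else hasMatchingGoA rest (some j) 0)
    else
      hasMatchingGoA rest last (run + 1)

def has_matching (i : String) : Bool := hasMatchingGoA i.toList none 0

-- ===== PORT B =====
-- B: any(i[k]==i[k+1] and (k==0 or i[k-1]!=i[k]) and (k+2==n or i[k+2]!=i[k]) for k in range(n-1));
-- every index accessed lies in range, so getD is an exact port of Python's indexing here.
def bWindowAny (l : List Char) : Bool :=
  let n := l.length
  (List.range (n - 1)).any fun k =>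
    (l.getD k ' ' == l.getD (k + 1) ' ') &&
    (decide (k = 0) || (l.getD (k - 1) ' ' != l.getD k ' ')) &&
    (decide (k + 2 = n) || (l.getD (k + 2) ' ' != l.getD k ' '))

def has_matching_alt (i : String) : Bool := bWindowAny i.toList

-- ===== PRECONDITION & SPEC =====
def Spec_has_matching (i : String) (out : Bool) : Prop := out = has_matching_alt i
instance (i : String) (out : Bool) : Decidable (Spec_has_matching i out) := by unfold Spec_has_matching; infer_instance

-- ===== CLAIM (what is proved, stated in full; the proofs are below) =====
def Claim_equal_has_matching : Prop := ∀ (i : String), Dom_has_matching i → Spec_has_matching i (has_matching i)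

-- ===== LEMMAS AND PROOFS =====

-- proof-side helpers: run-length decomposition shared characterisation
def countRun (c : Char) : List Char → Nat × List Char
  | [] => (0, [])
  | x :: xs => if x == c then ((countRun c xs).1 + 1, (countRun c xs).2) else (0, x :: xs)

theorem countRun_snd_length (c : Char) (xs : List Char) : (countRun c xs).2.length ≤ xs.length := by
  induction xs with
  | nil => simp [countRun]
  | cons x xs ih =>
    simp only [countRun]
    split
    · exact Nat.le_succ_of_le ih
    · simp

-- run-jumping middle form: true iff some maximal run has length exactly 2
def hasMatchingGoB : List Char → Bool
  | [] => false
  | c :: rest =>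
    if (countRun c rest).1 + 1 == 2 then true else hasMatchingGoB (countRun c rest).2
  termination_by l => l.length
  decreasing_by simpa using Nat.lt_succ_of_le (countRun_snd_length c rest)

-- window form with explicit previous character: structural counterpart of B's positional test
def winGo : Option Char → List Char → Bool
  | _, [] => false
  | _, [_] => false
  | p, a :: b :: rs => (a == b && p != some a && rs.head? != some a) || winGo (some a) (b :: rs)

-- B's any-over-range with the previous character generalized
def banyAux (p : Option Char) (l : List Char) : Bool :=
  (List.range (l.length - 1)).any fun k =>
    (l.getD k ' ' == l.getD (k + 1) ' ') &&
    ((if k = 0 then p else some (l.getD (k - 1) ' ')) != some (l.getD k ' ')) &&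
    (decide (k + 2 = l.length) || (l.getD (k + 2) ' ' != l.getD k ' '))

theorem alt_eq_banyAux (l : List Char) : bWindowAny l = banyAux none l := by
  simp only [bWindowAny, banyAux]
  congr 1
  funext k
  cases k with
  | zero => simp [bne]
  | succ j => simp [bne]

theorem goB_nil : hasMatchingGoB [] = false := by simp [hasMatchingGoB]

theorem goB_cons (c : Char) (rest : List Char) :
    hasMatchingGoB (c :: rest) =
      (if (countRun c rest).1 + 1 == 2 then true else hasMatchingGoB (countRun c rest).2) := by
  rw [hasMatchingGoB]

theorem countRun_fst_cons_eq (c : Char) (xs : List Char) :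
    (countRun c (c :: xs)).1 = (countRun c xs).1 + 1 := by simp [countRun]

theorem countRun_snd_cons_eq (c : Char) (xs : List Char) :
    (countRun c (c :: xs)).2 = (countRun c xs).2 := by simp [countRun]

theorem countRun_fst_cons_ne {x c : Char} (xs : List Char) (h : x ≠ c) :
    (countRun c (x :: xs)).1 = 0 := by simp [countRun, h]

theorem countRun_snd_cons_ne {x c : Char} (xs : List Char) (h : x ≠ c) :
    (countRun c (x :: xs)).2 = x :: xs := by simp [countRun, h]

theorem beq_succ_two (m : Nat) : (m + 1 == 2) = (m == 1) := by
  rcases eq_or_ne m 1 with h | h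
  · simp [h]
  · simp

-- A's state machine in terms of the run-jumping form
theorem goA_eq (xs : List Char) : ∀ (c : Char) (k : Nat),
    hasMatchingGoA xs (some c) k =
      (if (countRun c xs).1 + k == 1 then true else hasMatchingGoB (countRun c xs).2) := by
  induction xs with
  | nil =>
    intro c k
    simp only [hasMatchingGoA, countRun, Nat.zero_add, goB_nil, Bool.if_false_right, Bool.and_true]
    by_cases hk : k = 1 <;> simp [hk]
  | cons x xs ih =>
    intro c k
    by_cases hx : x = c
    · subst hx
      have h1 : hasMatchingGoA (x :: xs) (some x) k = hasMatchingGoA xs (some x) (k + 1) := by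
        simp [hasMatchingGoA]
      have h2 : (countRun x xs).1 + 1 + k = (countRun x xs).1 + (k + 1) := by omega
      rw [h1, ih, countRun_fst_cons_eq, countRun_snd_cons_eq, h2]
    · have h1 : hasMatchingGoA (x :: xs) (some c) k =
          (if k == 1 then true else hasMatchingGoA xs (some x) 0) := by
        simp [hasMatchingGoA, hx]
      rw [h1, countRun_fst_cons_ne xs hx, countRun_snd_cons_ne xs hx, goB_cons, ih x 0,
        beq_succ_two, Nat.add_zero, Nat.zero_add]

-- window form = run-jumping form, by mutual strong induction on length
theorem winGo_goB : ∀ (n : Nat) (l : List Char), l.length ≤ n →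
    (∀ (p : Option Char) (c : Char) (rest : List Char),
        l = c :: rest → p ≠ some c → winGo p l = hasMatchingGoB l) ∧
    (∀ (c : Char) (rest : List Char),
        l = c :: rest → winGo (some c) l = hasMatchingGoB (countRun c rest).2) := by
  intro n
  induction n with
  | zero =>
    intro l hl
    have : l = [] := List.length_eq_zero_iff.mp (Nat.le_zero.mp hl)
    subst this
    exact ⟨fun _ _ _ h _ => by simp at h, fun _ _ h => by simp at h⟩
  | succ n ih =>
    intro l hl
    constructor
    · rintro p c rest rfl hp
      cases rest with
      | nil =>
        simp [winGo, goB_cons, countRun, goB_nil]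
      | cons b rs =>
        have hlen : (b :: rs).length ≤ n := by simpa using Nat.succ_le_succ_iff.mp hl
        by_cases hb : b = c
        · subst hb
          have ih2 := (ih (b :: rs) hlen).2 b rs rfl
          have hpne : (p != some b) = true := by simp [bne, hp]
          cases rs with
          | nil =>
            simp [winGo, hpne, goB_cons, countRun]
          | cons x rs' =>
            by_cases hx : x = b
            · subst hx
              have hd : (((x :: rs').head?) != some x) = false := by simp
              have hc1 : (countRun x (x :: x :: rs')).1 = (countRun x rs').1 + 2 := by
                rw [countRun_fst_cons_eq, countRun_fst_cons_eq]
              have hc2 : (countRun x (x :: x :: rs')).2 = (countRun x rs').2 := by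
                rw [countRun_snd_cons_eq, countRun_snd_cons_eq]
              have hfalse : ((countRun x (x :: x :: rs')).1 + 1 == 2) = false := by
                rw [hc1, beq_eq_false_iff_ne]; omega
              have hcn : (countRun x (x :: rs')).2 = (countRun x rs').2 :=
                countRun_snd_cons_eq x rs'
              rw [winGo, goB_cons, hfalse, hd, hc2]
              simp only [Bool.and_false, Bool.false_or]
              rw [ih2, hcn]
              simp
            · have hd : (((x :: rs').head?) != some b) = true := by simp [bne, hx]
              have hc1 : (countRun b (b :: x :: rs')).1 = 1 := by
                rw [countRun_fst_cons_eq, countRun_fst_cons_ne rs' hx]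
              have htrue : ((countRun b (b :: x :: rs')).1 + 1 == 2) = true := by
                rw [hc1]; decide
              rw [winGo, goB_cons, htrue, hd, hpne]
              simp
        · have hcb : (c == b) = false := beq_eq_false_iff_ne.mpr (Ne.symm hb)
          have ih1 := (ih (b :: rs) hlen).1 (some c) b rs rfl (by simpa using Ne.symm hb)
          rw [winGo, hcb, goB_cons, countRun_fst_cons_ne rs hb,
            countRun_snd_cons_ne rs hb]
          simp only [Bool.false_and, Bool.false_or]
          rw [ih1, goB_cons]
          simp
    · rintro c rest rfl
      cases rest with
      | nil =>
        simp [winGo, countRun, goB_nil]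
      | cons b rs =>
        have hlen : (b :: rs).length ≤ n := by simpa using Nat.succ_le_succ_iff.mp hl
        by_cases hb : b = c
        · subst hb
          have ih2 := (ih (b :: rs) hlen).2 b rs rfl
          have hself : ((some b : Option Char) != some b) = false := by simp
          rw [winGo, hself, countRun_snd_cons_eq]
          simp only [Bool.and_false, Bool.false_and, Bool.false_or]
          exact ih2
        · have hcb : (c == b) = false := beq_eq_false_iff_ne.mpr (Ne.symm hb)
          have ih1 := (ih (b :: rs) hlen).1 (some c) b rs rfl (by simpa using Ne.symm hb)
          rw [winGo, hcb, countRun_snd_cons_ne rs hb]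
          simp only [Bool.false_and, Bool.false_or]
          exact ih1

-- B's generalized any-over-range = window form
theorem banyAux_eq_winGo : ∀ (l : List Char) (p : Option Char), banyAux p l = winGo p l := by
  intro l
  induction l with
  | nil => intro p; simp [banyAux, winGo]
  | cons a t ih =>
    intro p
    cases t with
    | nil => simp [banyAux, winGo]
    | cons b rs =>
      have hrange : List.range ((a :: b :: rs).length - 1)
          = 0 :: (List.range rs.length).map Nat.succ := by
        simp [List.range_succ_eq_map]
      rw [banyAux, hrange]
      simp only [List.any_cons, List.any_map]
      have h0 : ((a :: b :: rs).getD 0 ' ' == (a :: b :: rs).getD (0 + 1) ' ' &&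
            ((if True then p else some ((a :: b :: rs).getD (0 - 1) ' ')) !=
              some ((a :: b :: rs).getD 0 ' ')) &&
            (decide ((0 : Nat) + 2 = (a :: b :: rs).length) ||
              (a :: b :: rs).getD (0 + 2) ' ' != (a :: b :: rs).getD 0 ' '))
          = (a == b && p != some a && rs.head? != some a) := by
        cases rs with
        | nil => simp [bne]
        | cons x xs => simp [bne]
      have hsh : ((List.range rs.length).any
            ((fun k => ((a :: b :: rs).getD k ' ' == (a :: b :: rs).getD (k + 1) ' ' &&
              ((if k = 0 then p else some ((a :: b :: rs).getD (k - 1) ' ')) !=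
                some ((a :: b :: rs).getD k ' ')) &&
              (decide (k + 2 = (a :: b :: rs).length) ||
                (a :: b :: rs).getD (k + 2) ' ' != (a :: b :: rs).getD k ' '))) ∘ Nat.succ))
          = banyAux (some a) (b :: rs) := by
        rw [banyAux]
        simp only [List.length_cons, Nat.add_sub_cancel]
        congr 1
        funext k
        simp only [Function.comp_apply, List.getD_cons_succ, Nat.succ_eq_add_one,
          Nat.add_sub_cancel]
        cases k with
        | zero =>
          simp [show ((0 : Nat) + 1 + 2 = rs.length + 1 + 1) ↔ ((0 : Nat) + 2 = rs.length + 1)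
            from by omega]
        | succ j =>
          simp
      rw [h0, hsh, ih, winGo]

-- ===== VERDICT (by name: the statement is the Claim_ definition above) =====
theorem has_matching_spec : Claim_equal_has_matching := by
  intro i _
  unfold Spec_has_matching
  unfold has_matching has_matching_alt
  rw [alt_eq_banyAux, banyAux_eq_winGo]
  cases h : i.toList with
  | nil => simp [hasMatchingGoA, winGo]
  | cons c rest =>
    have h1 : hasMatchingGoA (c :: rest) none 0 = hasMatchingGoA rest (some c) 0 := by
      simp [hasMatchingGoA]
    have h2 := (winGo_goB (c :: rest).length (c :: rest) le_rfl).1 none c rest rfl (by simp)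
    rw [h1, goA_eq, h2, goB_cons, beq_succ_two, Nat.add_zero]
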